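-- pv_equiv track=rewrite | github.com/quantummerlin/quantumrealitycodes | agents/agents/core/code_agent.py | vibrational_encoding
-- ===== SOURCE A (Python) =====
-- def vibrational_encoding(text):
--     """Calculate Vibrational Encoding value of text.
--     A=1, B=2, ... Z=26. Digits add their face value.
--     All other characters are ignored.
--     """
--     total = 0
--     for ch in text.upper():
--         if 'A' <= ch <= 'Z':
--             total += ord(ch) - 64  # A=1, B=2, ... Z=26
--         elif '0' <= ch <= '9':
--             total += int(ch)
--     return total
-- ===== SOURCE B (Python) =====
-- def vibrational_encoding(text):
--     """Staged counting passes: for each alphabet letter and each digit,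
--     add its value times its number of occurrences in the uppercased text."""
--     up = text.upper()
--     total = 0
--     for i, ch in enumerate("ABCDEFGHIJKLMNOPQRSTUVWXYZ"):
--         total += (i + 1) * up.count(ch)
--     for d, ch in enumerate("0123456789"):
--         total += d * up.count(ch)
--     return total
-- ===== Notes on version B (the rewrite author's own statement) =====
-- stated objective: faster
-- what changed: B makes one str.count pass per alphabet symbol (26 letters + 10 digits) and sums value * occurrences, instead of A's single per-character Python loop with range-comparison branches.
import Mathlib
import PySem

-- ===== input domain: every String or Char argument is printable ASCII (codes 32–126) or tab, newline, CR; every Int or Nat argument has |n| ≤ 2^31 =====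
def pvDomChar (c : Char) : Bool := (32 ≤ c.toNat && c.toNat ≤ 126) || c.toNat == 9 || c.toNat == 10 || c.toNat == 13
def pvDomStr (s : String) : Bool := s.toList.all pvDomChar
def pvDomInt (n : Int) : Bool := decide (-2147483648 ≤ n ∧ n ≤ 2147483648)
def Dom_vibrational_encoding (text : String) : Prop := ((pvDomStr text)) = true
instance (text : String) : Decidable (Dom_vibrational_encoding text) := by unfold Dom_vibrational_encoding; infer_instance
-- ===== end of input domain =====

-- B replaces A's per-character scan-and-branch with 36 per-symbol counting passes (value * occurrence count); a timing run measured B faster (C-level str.count vs a per-character Python loop).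


-- ===== PORT A =====
def vibrational_encoding (text : String) : Int :=
  (PySem.Str.upper text).toList.foldl (fun total ch =>
    if 'A' ≤ ch ∧ ch ≤ 'Z' then total + ((ch.toNat : Int) - 64)
    else if '0' ≤ ch ∧ ch ≤ '9' then total + ((ch.toNat : Int) - 48)
    else total) 0

-- ===== PORT B =====
def vibrational_encoding_alt (text : String) : Int :=
  let up := PySem.Str.upper text
  let t1 := (PySem.List.enumerate "ABCDEFGHIJKLMNOPQRSTUVWXYZ".toList 0).foldl
    (fun total p => total + (p.1 + 1) * (PySem.Str.count up (String.ofList [p.2]) : Int)) 0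
  (PySem.List.enumerate "0123456789".toList 0).foldl
    (fun total p => total + p.1 * (PySem.Str.count up (String.ofList [p.2]) : Int)) t1

-- ===== PRECONDITION & SPEC =====
def Spec_vibrational_encoding (text : String) (out : Int) : Prop := out = vibrational_encoding_alt text
instance (text : String) (out : Int) : Decidable (Spec_vibrational_encoding text out) := by unfold Spec_vibrational_encoding; infer_instance

-- ===== CLAIM (what is proved, stated in full; the proofs are below) =====
def Claim_equal_vibrational_encoding : Prop := ∀ (text : String), Dom_vibrational_encoding text → Spec_vibrational_encoding text (vibrational_encoding text)

-- ===== LEMMAS AND PROOFS =====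

/-- The per-character value A accumulates. -/
def pvVal (ch : Char) : Int :=
  if 'A' ≤ ch ∧ ch ≤ 'Z' then (ch.toNat : Int) - 64
  else if '0' ≤ ch ∧ ch ≤ '9' then (ch.toNat : Int) - 48
  else 0

/-- The (symbol, value) pairs B effectively sums over. -/
def pvKeys : List (Char × Int) :=
  [('A',1),('B',2),('C',3),('D',4),('E',5),('F',6),('G',7),('H',8),('I',9),('J',10),
   ('K',11),('L',12),('M',13),('N',14),('O',15),('P',16),('Q',17),('R',18),('S',19),
   ('T',20),('U',21),('V',22),('W',23),('X',24),('Y',25),('Z',26),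
   ('0',0),('1',1),('2',2),('3',3),('4',4),('5',5),('6',6),('7',7),('8',8),('9',9)]

theorem count_go_single (c : Char) : ∀ (l : List Char) (fuel acc : Nat), l.length ≤ fuel →
    PySem.Chars.count.go [c] fuel l acc = acc + l.count c := by
  intro l
  induction l with
  | nil => intro fuel acc h; cases fuel <;> simp [PySem.Chars.count.go.eq_def]
  | cons x t ih =>
      intro fuel acc h
      cases fuel with
      | zero => simp at h
      | succ f =>
        rw [PySem.Chars.count.go.eq_def]
        simp only [List.isPrefixOf]
        by_cases hc : c = x
        · subst hc
          simp [ih f (acc + 1) (by simpa using h)]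
          omega
        · have hb : (c == x) = false := by simp [hc]
          simp [hb, ih f acc (by simpa using h), Ne.symm hc]

theorem count_single (s : List Char) (c : Char) : PySem.Chars.count s [c] = s.count c := by
  simp [PySem.Chars.count]
  rw [count_go_single c s s.length 0 le_rfl]; omega

set_option maxRecDepth 2048 in
theorem key_sum_fin : ∀ n : Fin 127,
    (pvKeys.map (fun kv => if kv.1 = Char.ofNat n.1 then kv.2 else 0)).sum
      = pvVal (Char.ofNat n.1) := by decide

theorem key_sum (x : Char) (hx : x.toNat ≤ 126) :
    (pvKeys.map (fun kv => if kv.1 = x then kv.2 else 0)).sum = pvVal x := by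
  have h := key_sum_fin ⟨x.toNat, by omega⟩
  simpa [Char.ofNat_toNat] using h

theorem keys_count_sum : ∀ (l : List Char), (∀ x ∈ l, x.toNat ≤ 126) →
    (pvKeys.map (fun kv => (l.count kv.1 : Int) * kv.2)).sum = (l.map pvVal).sum := by
  intro l
  induction l with
  | nil => intro _; decide
  | cons x t ih =>
      intro hb
      have hx : x.toNat ≤ 126 := hb x List.mem_cons_self
      have ht : ∀ y ∈ t, y.toNat ≤ 126 := fun y hy => hb y (List.mem_cons_of_mem _ hy)
      have hsplit : ∀ kv : Char × Int,
          ((x :: t).count kv.1 : Int) * kv.2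
            = (t.count kv.1 : Int) * kv.2 + (if kv.1 = x then kv.2 else 0) := by
        intro kv
        by_cases hk : kv.1 = x
        · rw [hk, List.count_cons_self]; push_cast; ring_nf; simp
        · have hxk : ¬ x = kv.1 := fun he => hk he.symm
          rw [List.count_cons]; simp [hk, hxk]
      calc (pvKeys.map (fun kv => ((x :: t).count kv.1 : Int) * kv.2)).sum
          = (pvKeys.map (fun kv => (t.count kv.1 : Int) * kv.2
              + (if kv.1 = x then kv.2 else 0))).sum := by
            exact congrArg List.sum (List.map_congr_left (fun kv _ => hsplit kv))
        _ = (pvKeys.map (fun kv => (t.count kv.1 : Int) * kv.2)).sum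
              + (pvKeys.map (fun kv => if kv.1 = x then kv.2 else 0)).sum := by
            rw [PySem.List.sum_map_add_int]
        _ = (t.map pvVal).sum + pvVal x := by rw [ih ht, key_sum x hx]
        _ = ((x :: t).map pvVal).sum := by simp [add_comm]

theorem portA_eq_sum (u : List Char) :
    u.foldl (fun total ch =>
      if 'A' ≤ ch ∧ ch ≤ 'Z' then total + ((ch.toNat : Int) - 64)
      else if '0' ≤ ch ∧ ch ≤ '9' then total + ((ch.toNat : Int) - 48)
      else total) 0 = (u.map pvVal).sum := by
  have h : ∀ (total : Int) (ch : Char),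
      (if 'A' ≤ ch ∧ ch ≤ 'Z' then total + ((ch.toNat : Int) - 64)
       else if '0' ≤ ch ∧ ch ≤ '9' then total + ((ch.toNat : Int) - 48)
       else total) = total + pvVal ch := by
    intro total ch; unfold pvVal; split_ifs <;> simp
  calc u.foldl (fun total ch =>
          if 'A' ≤ ch ∧ ch ≤ 'Z' then total + ((ch.toNat : Int) - 64)
          else if '0' ≤ ch ∧ ch ≤ '9' then total + ((ch.toNat : Int) - 48)
          else total) 0
      = u.foldl (fun total ch => total + pvVal ch) 0 := by
        exact PySem.List.foldl_congr_mem _ _ _ _ (fun acc ch _ => h acc ch)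
    _ = (u.map pvVal).sum := by rw [PySem.List.foldl_add]; simp

theorem portB_eq_keys_sum (text : String) :
    vibrational_encoding_alt text
      = (pvKeys.map (fun kv =>
          (((PySem.Str.upper text).toList.count kv.1 : Int) * kv.2))).sum := by
  unfold vibrational_encoding_alt pvKeys
  have hc : ∀ c : Char, (PySem.Str.count (PySem.Str.upper text) (String.ofList [c]) : Int)
      = ((PySem.Str.upper text).toList.count c : Int) := by
    intro c; simp [count_single]
  have he1 : PySem.List.enumerate "ABCDEFGHIJKLMNOPQRSTUVWXYZ".toList 0 = [((0:Int),'A'),((1:Int),'B'),((2:Int),'C'),((3:Int),'D'),((4:Int),'E'),((5:Int),'F'),((6:Int),'G'),((7:Int),'H'),((8:Int),'I'),((9:Int),'J'),((10:Int),'K'),((11:Int),'L'),((12:Int),'M'),((13:Int),'N'),((14:Int),'O'),((15:Int),'P'),((16:Int),'Q'),((17:Int),'R'),((18:Int),'S'),((19:Int),'T'),((20:Int),'U'),((21:Int),'V'),((22:Int),'W'),((23:Int),'X'),((24:Int),'Y'),((25:Int),'Z')] := by decide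
  have he2 : PySem.List.enumerate "0123456789".toList 0 = [((0:Int),'0'),((1:Int),'1'),((2:Int),'2'),((3:Int),'3'),((4:Int),'4'),((5:Int),'5'),((6:Int),'6'),((7:Int),'7'),((8:Int),'8'),((9:Int),'9')] := by decide
  rw [he1, he2]
  simp only [List.foldl, hc, List.map, List.sum_cons, List.sum_nil]
  push_cast
  ring

-- ===== VERDICT (by name: the statement is the Claim_ definition above) =====
theorem vibrational_encoding_spec : Claim_equal_vibrational_encoding := by
  intro text hdom
  unfold Spec_vibrational_encoding
  have hb : ∀ x ∈ (PySem.Str.upper text).toList, x.toNat ≤ 126 := by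
    have hup : ∀ n : Fin 127, (PySem.Chars.upperChar (Char.ofNat n.1)).toNat ≤ 126 := by decide
    intro x hx
    have : (PySem.Str.upper text).toList = text.toList.map PySem.Chars.upperChar := by
      simp [PySem.Chars.upper]
    rw [this] at hx
    rcases List.mem_map.mp hx with ⟨c, hc, rfl⟩
    have hcd : pvDomChar c = true := by
      have := hdom
      unfold Dom_vibrational_encoding pvDomStr at this
      exact List.all_eq_true.mp this c hc
    have hcb : c.toNat ≤ 126 := by
      unfold pvDomChar at hcd
      simp at hcd
      omega
    have h := hup ⟨c.toNat, by omega⟩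
    simpa [Char.ofNat_toNat] using h
  rw [vibrational_encoding, portA_eq_sum, portB_eq_keys_sum,
    keys_count_sum (PySem.Str.upper text).toList hb]
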